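-- pv_equiv track=rewrite | github.com/YuriGardinazzi/Information-Retrieval-Project | tests/test_pages_cleaner.py | findTripleApostrophe
-- ===== SOURCE A (Python) =====
-- def findTripleApostrophe(line):
--     i = 0
--     start = -1
--     end = -1
--     char = "'"
--     flag = False
--     flagStart = False
--
--     while(i + 2 < len(line) and flag == False):
--         if(line[i] == char and line[i + 1] == char and line[i + 2] == char):
--             if flagStart == False:
--                 start = i
--                 flagStart = True
--
--             else:
--                 end = i + 3
--                 flag = True
--
--         i += 1
--
--     return start, end
-- ===== SOURCE B (Python) =====
-- def findTripleApostrophe(line):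
--     start = line.find("'''")
--     if start == -1:
--         return -1, -1
--     second = line.find("'''", start + 1)
--     return start, -1 if second == -1 else second + 3
-- ===== Notes on version B (the rewrite author's own statement) =====
-- stated objective: idiomatic
-- what changed: Replaces the manual index/flag-driven while loop with two str.find calls (second search starting at start+1 to keep overlapping matches), returning directly from the results.
import Mathlib
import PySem

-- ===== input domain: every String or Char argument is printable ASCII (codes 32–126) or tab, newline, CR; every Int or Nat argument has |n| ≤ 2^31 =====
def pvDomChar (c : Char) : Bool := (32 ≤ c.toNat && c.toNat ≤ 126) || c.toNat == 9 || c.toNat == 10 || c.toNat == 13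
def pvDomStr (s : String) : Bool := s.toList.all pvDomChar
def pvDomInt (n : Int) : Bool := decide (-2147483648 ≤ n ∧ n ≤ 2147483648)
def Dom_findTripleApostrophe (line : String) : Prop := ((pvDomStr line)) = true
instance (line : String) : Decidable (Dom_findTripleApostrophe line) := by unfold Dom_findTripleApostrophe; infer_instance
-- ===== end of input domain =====

-- B replaces A's index/flag-driven while loop with two str.find calls (idiomatic decomposition).

-- ===== PORT A =====
-- A's while loop: steps i by 1 while i+2 < len(line) and not flag; here the suffix
-- line[i:] is carried as a list, so 'i+2 < len(line)' is the a::b::c::rest pattern.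
def pvLoopA : List Char → Int → Int → Int → Bool → Int × Int
  | a :: b :: c :: rest, i, start, e, flagStart =>
    if a = '\'' ∧ b = '\'' ∧ c = '\'' then
      if flagStart = false then
        pvLoopA (b :: c :: rest) (i + 1) i e true
      else
        -- end = i + 3; flag = True: the loop condition fails next round, return
        (start, i + 3)
    else
      pvLoopA (b :: c :: rest) (i + 1) start e flagStart
  | _, _, start, e, _ => (start, e)

def findTripleApostrophe (line : String) : Int × Int :=
  pvLoopA line.toList 0 (-1) (-1) false

-- ===== PORT B =====
def findTripleApostrophe_alt (line : String) : Int × Int :=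
  let start := PySem.Str.find line "'''"
  if start = -1 then (-1, -1)
  else
    let second := PySem.Str.findFrom line "'''" (start + 1)
    if second = -1 then (start, -1) else (start, second + 3)

-- ===== PRECONDITION & SPEC =====
def Spec_findTripleApostrophe (line : String) (out : Int × Int) : Prop := out = findTripleApostrophe_alt line
instance (line : String) (out : Int × Int) : Decidable (Spec_findTripleApostrophe line out) := by unfold Spec_findTripleApostrophe; infer_instance

-- ===== CLAIM (what is proved, stated in full; the proofs are below) =====
def Claim_equal_findTripleApostrophe : Prop := ∀ (line : String), Dom_findTripleApostrophe line → Spec_findTripleApostrophe line (findTripleApostrophe line)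

-- ===== LEMMAS AND PROOFS =====

-- cons-recurrence for PySem.Chars.find, derived from its first-occurrence spec
theorem pv_find_nil (sub : List Char) (h : sub ≠ []) : PySem.Chars.find [] sub = -1 := by
  rw [PySem.Chars.find_eq_neg_one_iff]
  intro hinf
  exact h (List.eq_nil_of_infix_nil hinf)

theorem pv_find_cons (a : Char) (l sub : List Char) (_h : sub ≠ []) :
    PySem.Chars.find (a :: l) sub =
      if sub <+: (a :: l) then 0
      else if PySem.Chars.find l sub = -1 then -1 else PySem.Chars.find l sub + 1 := by
  split_ifs with hp hl
  · -- prefix at 0: find is the first occurrence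
    have hinf : sub <:+: (a :: l) := hp.isInfix
    have hnn : 0 ≤ PySem.Chars.find (a :: l) sub := (PySem.Chars.find_nonneg_iff _ _).2 hinf
    have hspec := PySem.Chars.find_spec hnn
    by_contra hne
    have hpos : 0 < (PySem.Chars.find (a :: l) sub).toNat := by omega
    exact hspec.2 0 hpos (by simpa using hp)
  · -- no occurrence anywhere
    rw [PySem.Chars.find_eq_neg_one_iff]
    intro hinf
    rcases List.infix_cons_iff.1 hinf with h1 | h2
    · exact hp h1
    · exact (PySem.Chars.find_eq_neg_one_iff l sub).1 hl |>.elim (h2)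
  · -- first occurrence in l at j ⇒ in a::l at j+1
    set j := PySem.Chars.find l sub with hj
    have hinfl : sub <:+: l := by
      by_contra hc
      exact hl ((PySem.Chars.find_eq_neg_one_iff l sub).2 hc)
    have hnnl : 0 ≤ j := (PySem.Chars.find_nonneg_iff l sub).2 hinfl
    have hspecl := PySem.Chars.find_spec hnnl
    have hinf : sub <:+: (a :: l) := List.infix_cons hinfl
    have hnn : 0 ≤ PySem.Chars.find (a :: l) sub := (PySem.Chars.find_nonneg_iff _ _).2 hinf
    have hspec := PySem.Chars.find_spec hnn
    set k := PySem.Chars.find (a :: l) sub with hk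
    -- show k = j + 1 by mutual minimality
    have hfound : sub <+: (a :: l).drop (j.toNat + 1) := by
      simpa using hspecl.1
    have hkle : k ≤ j + 1 := by
      by_contra hgt
      exact hspec.2 (j.toNat + 1) (by omega) hfound
    have hkpos : k ≠ 0 := by
      intro h0
      have : sub <+: (a :: l) := by
        have := hspec.1
        rw [h0] at this
        simpa using this
      exact hp this
    have hjk : j + 1 ≤ k := by
      by_contra hlt
      -- k ≥ 1, k - 1 < j : occurrence in l before j, contradicting minimality
      have hk1 : 1 ≤ k := by omega
      have hocc : sub <+: l.drop (k.toNat - 1) := by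
        have := hspec.1
        have hkt : k.toNat = (k.toNat - 1) + 1 := by omega
        rw [hkt] at this
        simpa using this
      exact hspecl.2 (k.toNat - 1) (by omega) hocc
    omega

-- prefix of the triple pattern on a long-enough list is exactly the three-char test
theorem pv_triple_prefix (a b c : Char) (rest : List Char) :
    ('\'' :: '\'' :: '\'' :: [] : List Char) <+: (a :: b :: c :: rest) ↔ (a = '\'' ∧ b = '\'' ∧ c = '\'') := by
  constructor
  · intro h
    rcases h with ⟨t, ht⟩
    simp at ht
    exact ⟨ht.1.symm, ht.2.1.symm, ht.2.2.1.symm⟩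
  · rintro ⟨ha, hb, hc⟩
    subst ha; subst hb; subst hc
    exact ⟨rest, rfl⟩

-- phase 2 of A's loop (flagStart = true): scanning for the second occurrence
theorem pv_phase2 (s : List Char) (i start : Int) :
    pvLoopA s i start (-1) true =
      (start, if PySem.Chars.find s ['\'', '\'', '\''] = -1 then -1
              else i + PySem.Chars.find s ['\'', '\'', '\''] + 3) := by
  induction s generalizing i with
  | nil => rw [pv_find_nil _ (by simp)]; simp [pvLoopA]
  | cons a t ih =>
    match t with
    | [] =>
      have : PySem.Chars.find [a] ['\'', '\'', '\''] = -1 := by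
        rw [PySem.Chars.find_eq_neg_one_iff]
        intro h; have := h.length_le; simp at this
      rw [this]; simp [pvLoopA]
    | [b] =>
      have : PySem.Chars.find [a, b] ['\'', '\'', '\''] = -1 := by
        rw [PySem.Chars.find_eq_neg_one_iff]
        intro h; have := h.length_le; simp at this
      rw [this]; simp [pvLoopA]
    | b :: c :: rest =>
      rw [pv_find_cons _ _ _ (by simp)]
      by_cases htrip : a = '\'' ∧ b = '\'' ∧ c = '\''
      · rw [if_pos ((pv_triple_prefix a b c rest).2 htrip)]
        simp only [pvLoopA, if_pos htrip]
        norm_num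
      · rw [if_neg (fun hp => htrip ((pv_triple_prefix a b c rest).1 hp))]
        simp only [pvLoopA, if_neg htrip]
        rw [ih]
        set j := PySem.Chars.find (b :: c :: rest) ['\'', '\'', '\'']
        have hj : -1 ≤ j := PySem.Chars.neg_one_le_find _ _
        by_cases hj1 : j = -1
        · simp [hj1]
        · simp only [if_neg hj1]
          rw [if_neg (by omega : ¬ j + 1 = -1)]
          simp only [Prod.mk.injEq]
          exact ⟨trivial, by ring⟩

-- phase 1 of A's loop (flagStart = false): scanning for the first occurrence
theorem pv_phase1 (s : List Char) (i : Int) :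
    pvLoopA s i (-1) (-1) false =
      (if PySem.Chars.find s ['\'', '\'', '\''] = -1 then ((-1 : Int), (-1 : Int))
       else pvLoopA (s.drop ((PySem.Chars.find s ['\'', '\'', '\'']).toNat + 1))
              (i + PySem.Chars.find s ['\'', '\'', '\''] + 1)
              (i + PySem.Chars.find s ['\'', '\'', '\'']) (-1) true) := by
  induction s generalizing i with
  | nil => rw [pv_find_nil _ (by simp)]; simp [pvLoopA]
  | cons a t ih =>
    match t with
    | [] =>
      have : PySem.Chars.find [a] ['\'', '\'', '\''] = -1 := by
        rw [PySem.Chars.find_eq_neg_one_iff]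
        intro h; have := h.length_le; simp at this
      rw [this]; simp [pvLoopA]
    | [b] =>
      have : PySem.Chars.find [a, b] ['\'', '\'', '\''] = -1 := by
        rw [PySem.Chars.find_eq_neg_one_iff]
        intro h; have := h.length_le; simp at this
      rw [this]; simp [pvLoopA]
    | b :: c :: rest =>
      rw [pv_find_cons _ _ _ (by simp)]
      by_cases htrip : a = '\'' ∧ b = '\'' ∧ c = '\''
      · rw [if_pos ((pv_triple_prefix a b c rest).2 htrip)]
        simp only [pvLoopA, if_pos htrip]
        norm_num
      · rw [if_neg (fun hp => htrip ((pv_triple_prefix a b c rest).1 hp))]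
        simp only [pvLoopA, if_neg htrip]
        rw [ih]
        set j := PySem.Chars.find (b :: c :: rest) ['\'', '\'', '\'']
        have hj : -1 ≤ j := PySem.Chars.neg_one_le_find _ _
        by_cases hj1 : j = -1
        · simp [hj1]
        · simp only [if_neg hj1]
          rw [if_neg (by omega : ¬ j + 1 = -1)]
          have htn : (j + 1).toNat = j.toNat + 1 := by omega
          rw [htn]
          have hdrop : (a :: b :: c :: rest).drop (j.toNat + 1 + 1) = (b :: c :: rest).drop (j.toNat + 1) := by
            simp [List.drop_succ_cons]
          rw [hdrop]
          ring_nf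

-- find points inside the list when it finds the 3-char pattern: find + 3 ≤ length
theorem pv_find_room (s : List Char) (h : PySem.Chars.find s ['\'', '\'', '\''] ≠ -1) :
    (PySem.Chars.find s ['\'', '\'', '\'']).toNat + 3 ≤ s.length := by
  have hnn : 0 ≤ PySem.Chars.find s ['\'', '\'', '\''] := by
    have := PySem.Chars.neg_one_le_find s ['\'', '\'', '\'']
    omega
  have hspec := PySem.Chars.find_spec hnn
  have hlen := hspec.1.length_le
  simp at hlen
  omega

-- ===== VERDICT (by name: the statement is the Claim_ definition above) =====
theorem findTripleApostrophe_spec : Claim_equal_findTripleApostrophe := by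
  intro line _
  unfold Spec_findTripleApostrophe findTripleApostrophe findTripleApostrophe_alt
  rw [pv_phase1]
  rw [show PySem.Str.find line "'''" = PySem.Chars.find line.toList ['\'', '\'', '\''] from by simp]
  set j := PySem.Chars.find line.toList ['\'', '\'', '\''] with hjdef
  by_cases hj1 : j = -1
  · simp [hj1]
  · rw [if_neg hj1, if_neg hj1]
    have hnn : 0 ≤ j := by
      have := PySem.Chars.neg_one_le_find line.toList ['\'', '\'', '\'']
      omega
    have hroom := pv_find_room line.toList (hjdef ▸ hj1)
    rw [pv_phase2]
    have hk : j + 1 = ((j.toNat + 1 : Nat) : Int) := by omega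
    have hkle : j.toNat + 1 ≤ line.toList.length := by omega
    have hff : PySem.Str.findFrom line "'''" (j + 1) none =
        if PySem.Chars.find (line.toList.drop (j.toNat + 1)) ['\'', '\'', '\''] = -1 then -1
        else (j.toNat + 1 : Nat) + PySem.Chars.find (line.toList.drop (j.toNat + 1)) ['\'', '\'', '\''] := by
      rw [PySem.Str.findFrom_eq, hk]
      exact PySem.Chars.findFrom_natCast line.toList ['\'', '\'', '\''] (j.toNat + 1) hkle
    rw [hff]
    set j2 := PySem.Chars.find (line.toList.drop (j.toNat + 1)) ['\'', '\'', '\''] with hj2def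
    have hj2 : -1 ≤ j2 := PySem.Chars.neg_one_le_find _ _
    by_cases hj21 : j2 = -1
    · simp [hj21]
    · rw [if_neg hj21, if_neg hj21, if_neg (by omega : ¬ ((j.toNat + 1 : Nat) : Int) + j2 = -1)]
      simp only [Prod.mk.injEq]
      constructor <;> omega
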